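-- pv_equiv track=rewrite | github.com/miliar/Code_Jam_Webscraper | solutions_python/Problem_181/1393.py | max_lexicographical
-- ===== SOURCE A (Python) =====
-- def max_lexicographical(string):
--     result = [string[0]]
--     for c in string[1:]:
--         if c >= result[0]:
--             result = [c] + result
--         else:
--             result = result + [c]
--     return ''.join(result)
-- ===== SOURCE B (Python) =====
-- def max_lexicographical(string):
--     # Different algorithm: build the prefix-maximum table first; a character
--     # belongs to the front part exactly when it EQUALS its prefix maximum,
--     # so the answer is those characters in reverse order followed by the rest.
--     best = []
--     m = string[0]
--     for c in string:
--         if c > m: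
--             m = c
--         best.append(m)
--     front = [c for c, b in zip(string, best) if c == b]
--     back = [c for c, b in zip(string, best) if c != b]
--     front.reverse()
--     return ''.join(front) + ''.join(back)
-- ===== Notes on version B (the rewrite author's own statement) =====
-- stated objective: faster
-- what changed: A rebuilds the whole result list by concatenation at every step (quadratic); B first computes the prefix-maximum table, then partitions characters by whether they equal their prefix maximum (front, reversed) or not (back), in staged linear passes.
import Mathlib
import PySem

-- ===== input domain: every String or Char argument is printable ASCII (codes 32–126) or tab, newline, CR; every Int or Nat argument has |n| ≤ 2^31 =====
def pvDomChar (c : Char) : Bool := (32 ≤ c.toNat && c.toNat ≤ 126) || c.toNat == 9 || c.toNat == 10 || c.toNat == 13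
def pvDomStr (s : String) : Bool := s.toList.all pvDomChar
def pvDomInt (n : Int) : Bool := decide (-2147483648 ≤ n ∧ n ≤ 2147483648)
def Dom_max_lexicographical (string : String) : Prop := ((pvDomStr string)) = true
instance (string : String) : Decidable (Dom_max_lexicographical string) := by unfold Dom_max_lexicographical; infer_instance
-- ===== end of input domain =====

-- B replaces A's quadratic incremental list rebuilding with a prefix-maximum
-- table and staged filter passes; objective: faster.


-- ===== PORT A =====
-- loop over string[1:]; result is nonempty throughout, so result[0] = headD
def aLoop : List Char → List Char → List Char
  | [], r => r
  | c :: t, r => if r.headD ' ' ≤ c then aLoop t ([c] ++ r) else aLoop t (r ++ [c])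

def max_lexicographical (string : String) : String :=
  match string.toList with
  | [] => ""            -- Python raises IndexError here; excluded by Pre_
  | c0 :: rest => String.ofList (aLoop rest [c0])

-- ===== PORT B =====
-- prefix-maximum table (Python's `best` loop: m starts at string[0])
def pmLoop : List Char → Char → List Char
  | [], _ => []
  | c :: t, m => let m' := if m < c then c else m; m' :: pmLoop t m'

def max_lexicographical_alt (string : String) : String :=
  match string.toList with
  | [] => ""            -- B's Python also indexes string[0]; excluded by Pre_
  | c0 :: rest =>
    let chars := c0 :: rest
    let best := pmLoop chars c0
    let front := ((chars.zip best).filter (fun p => p.1 == p.2)).map Prod.fst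
    let back := ((chars.zip best).filter (fun p => p.1 != p.2)).map Prod.fst
    String.ofList (front.reverse ++ back)

-- ===== PRECONDITION & SPEC =====
-- both Pythons raise IndexError on the empty string (string[0])
def Pre_max_lexicographical (string : String) : Prop := string ≠ ""
instance (string : String) : Decidable (Pre_max_lexicographical string) := by unfold Pre_max_lexicographical; infer_instance
def pvWitness_max_lexicographical : String := "ba"

def Spec_max_lexicographical (string : String) (out : String) : Prop := out = max_lexicographical_alt string
instance (string : String) (out : String) : Decidable (Spec_max_lexicographical string out) := by unfold Spec_max_lexicographical; infer_instance

-- ===== CLAIM (what is proved, stated in full; the proofs are below) =====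
def Claim_equal_max_lexicographical : Prop := ∀ (string : String), Dom_max_lexicographical string → Pre_max_lexicographical string → Spec_max_lexicographical string (max_lexicographical string)

-- ===== LEMMAS AND PROOFS =====

-- invariant: running A's loop from state front.reverse ++ back (front's last
-- element being the running max m) appends to front exactly the characters
-- that equal their prefix maximum, and to back the others
theorem aLoop_inv (cs : List Char) : ∀ (front back : List Char) (m : Char),
    front ≠ [] → front.getLast? = some m →
    aLoop cs (front.reverse ++ back) =
      (front ++ ((cs.zip (pmLoop cs m)).filter (fun p => p.1 == p.2)).map Prod.fst).reverse
      ++ (back ++ ((cs.zip (pmLoop cs m)).filter (fun p => p.1 != p.2)).map Prod.fst) := by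
  induction cs with
  | nil => intro front back m _ _; simp [aLoop, pmLoop]
  | cons c t ih =>
    intro front back m hne hlast
    have hhead : (front.reverse ++ back).headD ' ' = m := by
      cases h : front.reverse with
      | nil => exact absurd (by simpa using h) hne
      | cons x xs =>
        have h2 : front.getLast? = some x := by
          rw [← List.head?_reverse, h]; rfl
        rw [hlast] at h2
        simp [(Option.some_inj.mp h2).symm]
    by_cases hc : m ≤ c
    · have hm' : (if m < c then c else m) = c := by
        by_cases h : m < c
        · simp [h]
        · have : m = c := le_antisymm hc (not_lt.mp h)
          simp [this]
      simp only [aLoop, hhead, pmLoop, hm', List.zip_cons_cons, List.filter_cons,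
        if_pos hc, beq_self_eq_true, bne_self_eq_false, if_true, Bool.false_eq_true,
        if_false, List.map_cons]
      have hstate : ([c] ++ (front.reverse ++ back)) = (front ++ [c]).reverse ++ back := by
        simp
      rw [hstate, ih (front ++ [c]) back c (by simp) (by simp)]
      simp
    · have hlt : c < m := not_le.mp hc
      have hm' : (if m < c then c else m) = m := by
        simp [not_lt.mpr (le_of_lt hlt)]
      have heq : (c == m) = false := beq_eq_false_iff_ne.mpr (ne_of_lt hlt)
      have hne2 : (c != m) = true := by simp [bne, heq]
      simp only [aLoop, hhead, pmLoop, hm', List.zip_cons_cons, List.filter_cons,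
        if_neg hc, heq, hne2, if_true, Bool.false_eq_true, if_false, List.map_cons]
      have hstate : ((front.reverse ++ back) ++ [c]) = front.reverse ++ (back ++ [c]) := by
        simp
      rw [hstate, ih front (back ++ [c]) m hne hlast]
      simp

-- ===== VERDICT (by name: the statement is the Claim_ definition above) =====
theorem max_lexicographical_spec : Claim_equal_max_lexicographical := by
  intro s _ hpre
  unfold Spec_max_lexicographical max_lexicographical max_lexicographical_alt
  cases h : s.toList with
  | nil => exact absurd (by rw [← s.ofList_toList, h]) hpre
  | cons c0 rest =>
    have hinv := aLoop_inv rest [c0] [] c0 (by simp) (by simp)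
    simp only [pmLoop, lt_irrefl, if_false, List.zip_cons_cons, List.filter_cons,
      beq_self_eq_true, bne_self_eq_false, if_true, Bool.false_eq_true, if_false,
      List.map_cons]
    rw [show aLoop rest [c0] = aLoop rest ([c0].reverse ++ []) by simp, hinv]
    simp
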